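-- pv_equiv track=rewrite | github.com/TimmyTwoD/CS165-Project-1 | Crack Code.py | getKCombinationsRecursive
-- ===== SOURCE A (Python) =====
-- def getKCombinationsRecursive(sets, password, n, k, combinationsList):
--     # Base case: k is 0,
--     if (k == 0):
--         combinationsList.append(password)
--         return
--
--     # get all combinations of k lowercase letters
--     for i in range(n):
--         # Next character of input added
--         # ex) aaaaaa -> aaaaab -> aaaaac etc.
--         newPassword = password + sets[i]
--
--         # decrease k because a new character is added
--         # make recursive call
--         getKCombinationsRecursive(sets, newPassword, n, k - 1, combinationsList)
--     return combinationsList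
-- ===== SOURCE B (Python) =====
-- def getKCombinationsRecursive(sets, password, n, k, combinationsList):
--     if k == 0:
--         combinationsList.append(password)
--         return None
--     syms = [sets[i] for i in range(n)]
--     level = [password]
--     for _ in range(k):
--         level = [p + s for p in level for s in syms]
--         if not level:
--             break
--     combinationsList.extend(level)
--     return combinationsList
-- ===== Notes on version B (the rewrite author's own statement) =====
-- stated objective: alternative
-- what changed: Replaces the recursive depth-first search over k with an iterative breadth-first build: the list of partial passwords is expanded level by level (at most k times, stopping early when it becomes empty), then appended in one go.
-- outside the precondition, e.g. on getKCombinationsRecursive([], 'p', 0, -1, []): A returns [], B returns ['p']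
import Mathlib
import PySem

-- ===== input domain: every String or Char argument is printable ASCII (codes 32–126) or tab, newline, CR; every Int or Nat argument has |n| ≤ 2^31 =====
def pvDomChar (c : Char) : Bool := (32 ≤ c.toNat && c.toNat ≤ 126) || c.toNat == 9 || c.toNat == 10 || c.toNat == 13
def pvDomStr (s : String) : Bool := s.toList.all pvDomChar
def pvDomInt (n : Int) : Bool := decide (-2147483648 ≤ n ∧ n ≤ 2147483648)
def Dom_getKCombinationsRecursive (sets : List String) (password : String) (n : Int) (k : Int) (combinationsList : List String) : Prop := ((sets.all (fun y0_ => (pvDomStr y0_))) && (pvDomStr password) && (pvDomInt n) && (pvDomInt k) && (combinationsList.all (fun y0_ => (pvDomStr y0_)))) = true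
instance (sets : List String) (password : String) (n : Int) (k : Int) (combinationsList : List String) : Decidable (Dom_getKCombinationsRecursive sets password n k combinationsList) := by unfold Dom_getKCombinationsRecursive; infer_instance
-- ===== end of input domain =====

-- B replaces A's recursive DFS with an iterative level-by-level (BFS) build of the
-- combinations; equivalence is about the RETURN value (both Pythons also append the
-- results to combinationsList in the same way).


-- ===== PORT A =====
-- State of combinationsList after a recursive call (Python mutates the list; the
-- port threads it).  The Int k is structurally k.toNat (Pre_ requires 0 ≤ k).
-- A failing sets[i] (IndexError) is modelled by pyGet? = none, which aborts the
-- whole computation, exactly as the exception propagates in Python.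
def aRec (sets : List String) (password : String) (n : Int) (k : Nat)
    (acc : List String) : Option (List String) :=
  match k with
  | 0 => some (acc ++ [password])
  | Nat.succ k' =>
      (PySem.List.pyRange 0 n 1).foldl
        (fun acc? i => acc?.bind (fun acc =>
          (PySem.List.pyGet? sets i).bind (fun s =>
            aRec sets (password ++ s) n k' acc)))
        (some acc)

def getKCombinationsRecursive (sets : List String) (password : String) (n : Int) (k : Int) (combinationsList : List String) : Option (List String) :=
  if k = 0 then none
  else aRec sets password n k.toNat combinationsList

-- ===== PORT B =====
-- 'for _ in range(k): level = …; if not level: break' — recursion on the remaining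
-- iteration count, returning as soon as the level is empty (the break).
def bLoop (syms : List String) (m : Nat) (level : List String) : List String :=
  match m with
  | 0 => level
  | Nat.succ m' =>
      let next := level.flatMap (fun p => syms.map (fun s => p ++ s))
      if next.isEmpty then next else bLoop syms m' next

def getKCombinationsRecursive_alt (sets : List String) (password : String) (n : Int) (k : Int) (combinationsList : List String) : Option (List String) :=
  if k = 0 then none
  else
    -- syms = [sets[i] for i in range(n)]; an out-of-range index aborts (IndexError)
    let syms? := (PySem.List.pyRange 0 n 1).foldl
      (fun acc? i => acc?.bind (fun acc =>
        (PySem.List.pyGet? sets i).map (fun s => acc ++ [s])))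
      (some [])
    syms?.bind (fun syms =>
      some (combinationsList ++ bLoop syms k.toNat [password]))

-- ===== PRECONDITION & SPEC =====
-- Pre_ excludes the inputs on which A raises — k > 0 with n > len(sets)
-- (IndexError) and negative k with n > 0 (RecursionError) — and, with them, all
-- negative k: for k < 0 and n ≤ 0 A happens to return combinationsList unchanged,
-- but a negative combination length is outside the function's natural domain and
-- A's value there is an accident of the k == 0 test (see claim.json cites).
def Pre_getKCombinationsRecursive (sets : List String) (password : String) (n : Int) (k : Int) (combinationsList : List String) : Prop :=
  0 ≤ k ∧ (k = 0 ∨ n ≤ (sets.length : Int))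
instance (sets : List String) (password : String) (n : Int) (k : Int) (combinationsList : List String) : Decidable (Pre_getKCombinationsRecursive sets password n k combinationsList) := by unfold Pre_getKCombinationsRecursive; infer_instance

def pvWitness_getKCombinationsRecursive : List String × String × Int × Int × List String :=
  (["a", "b"], "p", 2, 2, ["q"])

def Spec_getKCombinationsRecursive (sets : List String) (password : String) (n : Int) (k : Int) (combinationsList : List String) (out : Option (List String)) : Prop := out = getKCombinationsRecursive_alt sets password n k combinationsList
instance (sets : List String) (password : String) (n : Int) (k : Int) (combinationsList : List String) (out : Option (List String)) : Decidable (Spec_getKCombinationsRecursive sets password n k combinationsList out) := by unfold Spec_getKCombinationsRecursive; infer_instance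

-- ===== CLAIM (what is proved, stated in full; the proofs are below) =====
def Claim_equal_getKCombinationsRecursive : Prop := ∀ (sets : List String) (password : String) (n : Int) (k : Int) (combinationsList : List String), Dom_getKCombinationsRecursive sets password n k combinationsList → Pre_getKCombinationsRecursive sets password n k combinationsList → Spec_getKCombinationsRecursive sets password n k combinationsList (getKCombinationsRecursive sets password n k combinationsList)

-- ===== LEMMAS AND PROOFS =====

-- one BFS expansion step
def expandStep (syms : List String) (l : List String) : List String :=
  l.flatMap (fun p => syms.map (fun s => p ++ s))

def iterExpand (syms : List String) : Nat → List String → List String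
  | 0, l => l
  | Nat.succ m, l => iterExpand syms m (expandStep syms l)

theorem iterExpand_nil (syms : List String) (m : Nat) : iterExpand syms m [] = [] := by
  induction m with
  | zero => rfl
  | succ m ih => simpa [iterExpand, expandStep] using ih

theorem bLoop_eq_iterExpand (syms : List String) (m : Nat) (level : List String) :
    bLoop syms m level = iterExpand syms m level := by
  induction m generalizing level with
  | zero => rfl
  | succ m ih =>
      show (let next := expandStep syms level;
            if next.isEmpty then next else bLoop syms m next)
          = iterExpand syms m (expandStep syms level)
      by_cases h : (expandStep syms level).isEmpty
      · simp only [h, if_true]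
        rw [List.isEmpty_iff] at h
        rw [h, iterExpand_nil]
      · simp only [h, if_false]
        exact ih _

theorem expandStep_append (syms : List String) (xs ys : List String) :
    expandStep syms (xs ++ ys) = expandStep syms xs ++ expandStep syms ys := by
  simp [expandStep]

theorem iterExpand_append (syms : List String) (m : Nat) (xs ys : List String) :
    iterExpand syms m (xs ++ ys) = iterExpand syms m xs ++ iterExpand syms m ys := by
  induction m generalizing xs ys with
  | zero => rfl
  | succ m ih => simp [iterExpand, expandStep_append, ih]

theorem iterExpand_flatMap (syms : List String) (m : Nat) (l : List String) :
    iterExpand syms m l = l.flatMap (fun p => iterExpand syms m [p]) := by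
  induction l with
  | nil => simp [iterExpand_nil]
  | cons p rest ih =>
      have : p :: rest = [p] ++ rest := rfl
      rw [this, iterExpand_append, ih]
      simp

-- 'acc? := acc?.bind (λ a, some (a ++ g x))' threaded over a list appends the flatMap
theorem foldl_bind_append {α β : Type} (l : List α) (g : α → List β) (acc : List β) :
    l.foldl (fun a? x => a?.bind (fun a => some (a ++ g x))) (some acc)
      = some (acc ++ l.flatMap g) := by
  induction l generalizing acc with
  | nil => simp
  | cons x xs ih => simp [List.foldl_cons, ih, List.append_assoc]

-- in-range indices: pyGet? returns 'some' of its default-stripped value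
theorem pyGet?_mem_range_some (sets : List String) (n i : Int)
    (hn : n ≤ (sets.length : Int)) (hi : i ∈ PySem.List.pyRange 0 n 1) :
    PySem.List.pyGet? sets i = some ((PySem.List.pyGet? sets i).getD "") := by
  rw [PySem.List.mem_pyRange_one] at hi
  rw [PySem.List.pyGet?_eq_some_getElem sets hi.1 (by omega)]
  rfl

theorem aRec_eq_iterExpand (sets : List String) (n : Int)
    (hn : n ≤ (sets.length : Int)) (k : Nat) :
    ∀ (password : String) (acc : List String),
      aRec sets password n k acc
        = some (acc ++ iterExpand ((PySem.List.pyRange 0 n 1).map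
            (fun i => (PySem.List.pyGet? sets i).getD "")) k [password]) := by
  induction k with
  | zero => intro password acc; rfl
  | succ k ih =>
      intro password acc
      set syms := (PySem.List.pyRange 0 n 1).map
        (fun i => (PySem.List.pyGet? sets i).getD "") with hsyms
      have step : aRec sets password n (k + 1) acc
          = (PySem.List.pyRange 0 n 1).foldl
              (fun acc? i => acc?.bind (fun a =>
                (PySem.List.pyGet? sets i).bind (fun s =>
                  aRec sets (password ++ s) n k a)))
              (some acc) := rfl
      rw [step]
      have hfun : (PySem.List.pyRange 0 n 1).foldl
            (fun acc? i => acc?.bind (fun a =>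
              (PySem.List.pyGet? sets i).bind (fun s =>
                aRec sets (password ++ s) n k a)))
            (some acc)
          = (PySem.List.pyRange 0 n 1).foldl
            (fun acc? i => acc?.bind (fun a => some (a ++
              iterExpand syms k
                [password ++ (PySem.List.pyGet? sets i).getD ""]))) (some acc) := by
        apply PySem.List.foldl_congr_mem
        intro a? i hi
        rw [pyGet?_mem_range_some sets n i hn hi]
        simp only [Option.bind_some]
        congr 1
        funext a
        exact ih _ a
      rw [hfun, foldl_bind_append]
      congr 2
      have : iterExpand syms (k + 1) [password]
          = iterExpand syms k (expandStep syms [password]) := rfl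
      rw [this]
      have hexp : expandStep syms [password] = syms.map (fun s => password ++ s) := by
        simp [expandStep]
      rw [hexp, iterExpand_flatMap, hsyms]
      simp [List.flatMap_map]

-- B's syms-building loop succeeds and builds the map, for in-range n
theorem symsLoop_eq (sets : List String) (n : Int) (hn : n ≤ (sets.length : Int)) :
    (PySem.List.pyRange 0 n 1).foldl
      (fun acc? i => acc?.bind (fun acc =>
        (PySem.List.pyGet? sets i).map (fun s => acc ++ [s])))
      (some [])
      = some ((PySem.List.pyRange 0 n 1).map
          (fun i => (PySem.List.pyGet? sets i).getD "")) := by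
  have general : ∀ (l : List Int), (∀ i ∈ l, i ∈ PySem.List.pyRange 0 n 1) →
      ∀ (acc : List String),
      l.foldl (fun acc? i => acc?.bind (fun acc =>
        (PySem.List.pyGet? sets i).map (fun s => acc ++ [s]))) (some acc)
      = some (acc ++ l.map (fun i => (PySem.List.pyGet? sets i).getD "")) := by
    intro l
    induction l with
    | nil => intro _ acc; simp
    | cons x xs ih =>
        intro hmem acc
        simp only [List.foldl_cons, List.map_cons]
        rw [pyGet?_mem_range_some sets n x hn (hmem x (by simp))]
        simp only [Option.bind_some, Option.map_some]
        rw [ih (fun i hi => hmem i (by simp [hi])) (acc ++ [_])]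
        simp
  simpa using general (PySem.List.pyRange 0 n 1) (fun _ h => h) []

-- ===== VERDICT (by name: the statement is the Claim_ definition above) =====
theorem getKCombinationsRecursive_spec : Claim_equal_getKCombinationsRecursive := by
  intro sets password n k acc _ hpre
  unfold Spec_getKCombinationsRecursive getKCombinationsRecursive getKCombinationsRecursive_alt
  by_cases hk : k = 0
  · simp [hk]
  · have hn : n ≤ (sets.length : Int) := by
      rcases hpre.2 with h | h
      · exact absurd h hk
      · exact h
    simp only [hk, if_false]
    rw [aRec_eq_iterExpand sets n hn, symsLoop_eq sets n hn]
    simp only [Option.bind_some]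
    rw [bLoop_eq_iterExpand]
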